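-- pv_equiv track=rewrite | github.com/ryanthemaestro/ff2025 | functions/draft_ui.py | build_position_slot_map
-- ===== SOURCE A (Python) =====
-- DEFAULT_ROSTER_CONFIG = {
--     'num_teams': 10,
--     'use_positions': True,
--     'QB': 1,
--     'RB': 2,
--     'WR': 2,
--     'TE': 1,
--     'FLEX': 1,
--     'K': 1,
--     'DST': 1,
--     'Bench': 6,
--     # When use_positions is False, we use generic STARTER slots
--     'STARTERS': 8
-- }
--
-- def build_position_slot_map(config: dict) -> dict:
--     """Return mapping of position -> list of allowed slots to place that position."""
--     cfg = {**DEFAULT_ROSTER_CONFIG, **(config or {})}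
--     slot_map: dict = {
--         'QB': [], 'RB': [], 'WR': [], 'TE': [], 'K': [], 'DST': []
--     }
--     # Dedicated slots
--     if cfg.get('use_positions', True):
--         if cfg['QB'] >= 1:
--             slot_map['QB'].append('QB')
--         for i in range(1, cfg['RB'] + 1):
--             slot_map['RB'].append(f'RB{i}')
--         for i in range(1, cfg['WR'] + 1):
--             slot_map['WR'].append(f'WR{i}')
--         if cfg['TE'] >= 1:
--             slot_map['TE'].append('TE')
--         if cfg['K'] >= 1:
--             slot_map['K'].append('K')
--         if cfg['DST'] >= 1:
--             slot_map['DST'].append('DST')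
--         # FLEX is eligible for RB/WR/TE
--         flex_slots: list = []
--         if cfg['FLEX'] == 1:
--             flex_slots = ['FLEX']
--         elif cfg['FLEX'] > 1:
--             flex_slots = [f'FLEX{i}'] if cfg['FLEX'] == 1 else [f'FLEX{i}' for i in range(1, cfg['FLEX'] + 1)]
--         for s in flex_slots:
--             slot_map['RB'].append(s)
--             slot_map['WR'].append(s)
--             slot_map['TE'].append(s)
--     # STARTER slots (positionless) are eligible for any position
--     starter_slots: list = []
--     if not cfg.get('use_positions', True):
--         starter_slots = [f'STARTER{i}' for i in range(1, int(cfg.get('STARTERS', 8)) + 1)]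
--     if starter_slots:
--         for p in slot_map.keys():
--             slot_map[p].extend(starter_slots)
--     return slot_map
-- ===== SOURCE B (Python) =====
-- DEFAULT_ROSTER_CONFIG = {
--     'num_teams': 10,
--     'use_positions': True,
--     'QB': 1,
--     'RB': 2,
--     'WR': 2,
--     'TE': 1,
--     'FLEX': 1,
--     'K': 1,
--     'DST': 1,
--     'Bench': 6,
--     'STARTERS': 8
-- }
--
-- POSITIONS = ('QB', 'RB', 'WR', 'TE', 'K', 'DST')
--
-- def build_position_slot_map(config: dict) -> dict:
--     """Return mapping of position -> list of allowed slots to place that position."""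
--     cfg = {**DEFAULT_ROSTER_CONFIG, **(config or {})}
--     # One flat ordered list of (slot_name, eligible_positions) definitions.
--     defs = []
--     if cfg.get('use_positions', True):
--         if cfg['QB'] >= 1:
--             defs.append(('QB', ('QB',)))
--         defs.extend((f'RB{i}', ('RB',)) for i in range(1, cfg['RB'] + 1))
--         defs.extend((f'WR{i}', ('WR',)) for i in range(1, cfg['WR'] + 1))
--         for p in ('TE', 'K', 'DST'):
--             if cfg[p] >= 1:
--                 defs.append((p, (p,)))
--         n = cfg['FLEX']
--         flex_names = ['FLEX'] if n == 1 else [f'FLEX{i}' for i in range(1, n + 1)]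
--         defs.extend((s, ('RB', 'WR', 'TE')) for s in flex_names)
--     else:
--         defs.extend((f'STARTER{i}', POSITIONS)
--                     for i in range(1, int(cfg.get('STARTERS', 8)) + 1))
--     # Single pass: each position collects the names of the defs it is eligible for.
--     return {p: [name for name, elig in defs if p in elig] for p in POSITIONS}
-- ===== Notes on version B (the rewrite author's own statement) =====
-- stated objective: alternative
-- what changed: B replaces A's per-position mutation of the slot map (dedicated loops, then a FLEX loop appending to three lists, then a STARTER extend over all keys) by building one flat ordered list of (slot_name, eligible_positions) definitions and deriving each position's slot list in a single comprehension pass over it.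
import Mathlib
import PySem

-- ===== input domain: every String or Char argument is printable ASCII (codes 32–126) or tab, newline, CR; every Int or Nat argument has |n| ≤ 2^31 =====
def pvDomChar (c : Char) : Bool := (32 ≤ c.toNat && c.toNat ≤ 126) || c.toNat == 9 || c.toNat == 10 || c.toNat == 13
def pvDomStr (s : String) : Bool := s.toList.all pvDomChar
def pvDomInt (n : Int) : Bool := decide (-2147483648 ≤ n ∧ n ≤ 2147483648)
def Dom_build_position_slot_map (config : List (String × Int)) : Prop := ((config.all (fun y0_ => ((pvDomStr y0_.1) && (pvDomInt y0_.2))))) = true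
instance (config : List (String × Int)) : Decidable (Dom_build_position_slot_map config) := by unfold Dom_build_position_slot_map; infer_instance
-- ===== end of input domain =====

-- B rewrites A's per-position construction as one flat ordered list of (slot, eligible-positions)
-- definitions folded into the map in a single pass (objective: alternative decomposition; return value only).

-- ===== PORT A =====
-- DEFAULT_ROSTER_CONFIG (True encoded as 1: it is only ever used for truthiness)
def pvDefaultsA : PySem.Dict String Int :=
  PySem.Dict.ofList [("num_teams", 10), ("use_positions", 1), ("QB", 1), ("RB", 2), ("WR", 2),
    ("TE", 1), ("FLEX", 1), ("K", 1), ("DST", 1), ("Bench", 6), ("STARTERS", 8)]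

-- cfg = {**DEFAULT_ROSTER_CONFIG, **(config or {})}  ('config or {}' merges the same pairs either way)
def pvCfgA (config : List (String × Int)) : PySem.Dict String Int :=
  pvDefaultsA.update config

-- the initial slot_map literal {QB: [], …}
def pvD0 : PySem.Dict String (List String) :=
  PySem.Dict.ofList [("QB", []), ("RB", []), ("WR", []), ("TE", []), ("K", []), ("DST", [])]

-- the body of A after cfg is built (keys QB/RB/… are always present in cfg, so cfg[k] = getD k 0)
def pvSlotsA (cfg : PySem.Dict String Int) : List (String × List String) :=
  let slot_map := pvD0
  let slot_map :=
    if cfg.getD "use_positions" 1 ≠ 0 then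
      let slot_map := if cfg.getD "QB" 0 ≥ 1 then slot_map.modify "QB" [] (· ++ ["QB"]) else slot_map
      let slot_map := (PySem.List.pyRange 1 (cfg.getD "RB" 0 + 1) 1).foldl
        (fun d i => d.modify "RB" [] (· ++ ["RB" ++ PySem.Int.toStr i])) slot_map
      let slot_map := (PySem.List.pyRange 1 (cfg.getD "WR" 0 + 1) 1).foldl
        (fun d i => d.modify "WR" [] (· ++ ["WR" ++ PySem.Int.toStr i])) slot_map
      let slot_map := if cfg.getD "TE" 0 ≥ 1 then slot_map.modify "TE" [] (· ++ ["TE"]) else slot_map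
      let slot_map := if cfg.getD "K" 0 ≥ 1 then slot_map.modify "K" [] (· ++ ["K"]) else slot_map
      let slot_map := if cfg.getD "DST" 0 ≥ 1 then slot_map.modify "DST" [] (· ++ ["DST"]) else slot_map
      -- the Python '[f'FLEX{i}'] if cfg['FLEX'] == 1 else …' inside the elif is dead (FLEX > 1 there):
      -- the reachable computation is the comprehension
      let flex_slots : List String :=
        if cfg.getD "FLEX" 0 = 1 then ["FLEX"]
        else if cfg.getD "FLEX" 0 > 1 then
          (PySem.List.pyRange 1 (cfg.getD "FLEX" 0 + 1) 1).map (fun i => "FLEX" ++ PySem.Int.toStr i)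
        else []
      flex_slots.foldl (fun d s =>
        ((d.modify "RB" [] (· ++ [s])).modify "WR" [] (· ++ [s])).modify "TE" [] (· ++ [s])) slot_map
    else slot_map
  let starter_slots : List String :=
    if ¬ (cfg.getD "use_positions" 1 ≠ 0) then
      (PySem.List.pyRange 1 (cfg.getD "STARTERS" 8 + 1) 1).map (fun i => "STARTER" ++ PySem.Int.toStr i)
    else []
  let slot_map :=
    if starter_slots ≠ [] then
      slot_map.keys.foldl (fun d p => d.modify p [] (· ++ starter_slots)) slot_map
    else slot_map
  slot_map.items

def build_position_slot_map (config : List (String × Int)) : List (String × List String) :=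
  pvSlotsA (pvCfgA config)

-- ===== PORT B =====
def pvDefaultsB : PySem.Dict String Int :=
  PySem.Dict.ofList [("num_teams", 10), ("use_positions", 1), ("QB", 1), ("RB", 2), ("WR", 2),
    ("TE", 1), ("FLEX", 1), ("K", 1), ("DST", 1), ("Bench", 6), ("STARTERS", 8)]

def pvCfgB (config : List (String × Int)) : PySem.Dict String Int :=
  pvDefaultsB.update config

def pvPositionsB : List String := ["QB", "RB", "WR", "TE", "K", "DST"]

-- the flat ordered list of (slot_name, eligible_positions) definitions
def pvDefsB (cfg : PySem.Dict String Int) : List (String × List String) :=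
  if cfg.getD "use_positions" 1 ≠ 0 then
    (if cfg.getD "QB" 0 ≥ 1 then [("QB", ["QB"])] else [])
    ++ (PySem.List.pyRange 1 (cfg.getD "RB" 0 + 1) 1).map (fun i => ("RB" ++ PySem.Int.toStr i, ["RB"]))
    ++ (PySem.List.pyRange 1 (cfg.getD "WR" 0 + 1) 1).map (fun i => ("WR" ++ PySem.Int.toStr i, ["WR"]))
    ++ (["TE", "K", "DST"].foldl (fun acc p => if cfg.getD p 0 ≥ 1 then acc ++ [(p, [p])] else acc) [])
    ++ ((if cfg.getD "FLEX" 0 = 1 then ["FLEX"]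
         else (PySem.List.pyRange 1 (cfg.getD "FLEX" 0 + 1) 1).map (fun i => "FLEX" ++ PySem.Int.toStr i)).map
          (fun s => (s, ["RB", "WR", "TE"])))
  else
    (PySem.List.pyRange 1 (cfg.getD "STARTERS" 8 + 1) 1).map
      (fun i => ("STARTER" ++ PySem.Int.toStr i, pvPositionsB))

def build_position_slot_map_alt (config : List (String × Int)) : List (String × List String) :=
  let cfg := pvCfgB config
  let defs := pvDefsB cfg
  pvPositionsB.map (fun p => (p, (defs.filter (fun e => e.2.contains p)).map (·.1)))

-- ===== PRECONDITION & SPEC =====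
def Spec_build_position_slot_map (config : List (String × Int)) (out : List (String × List String)) : Prop := out = build_position_slot_map_alt config
instance (config : List (String × Int)) (out : List (String × List String)) : Decidable (Spec_build_position_slot_map config out) := by unfold Spec_build_position_slot_map; infer_instance

-- ===== CLAIM (what is proved, stated in full; the proofs are below) =====
def Claim_equal_build_position_slot_map : Prop := ∀ (config : List (String × Int)), Dom_build_position_slot_map config → Spec_build_position_slot_map config (build_position_slot_map config)

-- ===== LEMMAS AND PROOFS =====
-- pair-fold body shared by the proof's loop normal form
def pvPB : PySem.Dict String (List String) → String × String → PySem.Dict String (List String) :=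
  fun d p => d.modify p.1 [] (· ++ [p.2])

theorem pvNodupFilterBeq (l : List String) (p : String) (h : l.Nodup) :
    l.filter (fun q => q == p) = if p ∈ l then [p] else [] := by
  induction l with
  | nil => simp
  | cons a t ih =>
    simp only [List.filter_cons, List.nodup_cons] at *
    obtain ⟨ha, ht⟩ := h
    by_cases hap : a = p
    · subst hap
      have : List.filter (fun q => q == a) t = [] :=
        List.filter_eq_nil_iff.2 (fun q hq => by simp only [beq_iff_eq]; rintro rfl; exact ha hq)
      simp [this, ha]
    · simp [Ne.symm hap, hap, ih ht]

theorem pvFilterFlatMap (defs : List (String × List String)) (p : String)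
    (h : ∀ e ∈ defs, e.2.Nodup) :
    ((defs.flatMap (fun e => e.2.map (fun q => (q, e.1)))).filter (fun x => x.1 == p)).map (·.2)
    = (defs.filter (fun e => e.2.contains p)).map (·.1) := by
  induction defs with
  | nil => simp
  | cons e rest ih =>
    simp only [List.flatMap_cons, List.filter_append, List.map_append, List.filter_cons]
    rw [ih (fun x hx => h x (List.mem_cons_of_mem _ hx))]
    have hnd := h e (List.mem_cons_self)
    rw [List.filter_map, List.map_map]
    have hcomp : ((fun (x : String × String) => x.1 == p) ∘ (fun q => (q, e.1))) = (fun q => q == p) := rfl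
    rw [hcomp, pvNodupFilterBeq _ _ hnd]
    by_cases hp : p ∈ e.2
    · simp [hp]
    · simp [hp]

theorem pvFoldItems (L : List (String × String))
    (hsub : ∀ x ∈ L, x.1 ∈ (["QB", "RB", "WR", "TE", "K", "DST"] : List String)) :
    (L.foldl pvPB pvD0).items
    = (["QB", "RB", "WR", "TE", "K", "DST"] : List String).map
        (fun k => (k, (L.filter (fun x => x.1 == k)).map (·.2))) := by
  have hkeys : (L.foldl pvPB pvD0).keys
      = (["QB", "RB", "WR", "TE", "K", "DST"] : List String) := by
    rw [show pvPB = (fun d (x : String × String) => d.modify x.1 [] (fun v => v ++ [x.2])) from rfl]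
    rw [PySem.Dict.keys_foldl_modify_key L Prod.fst [] (fun _ x => (· ++ [x.2])) pvD0]
    rw [PySem.Set.update_eq_append_filter]
    have hnil : List.filter (fun y => !PySem.Set.contains pvD0.keys y) (PySem.Set.ofList (L.map Prod.fst)) = [] := by
      apply List.filter_eq_nil_iff.2
      intro y hy
      have : y ∈ L.map Prod.fst := (PySem.Set.mem_ofList _ _).1 hy
      obtain ⟨x, hx, rfl⟩ := List.mem_map.1 this
      have := hsub x hx
      simp only [List.mem_cons, List.not_mem_nil, or_false] at this
      rcases this with h | h | h | h | h | h <;> rw [h] <;> decide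
    rw [hnil, List.append_nil]
    rfl
  have hnd : (L.foldl pvPB pvD0).keys.Nodup := by
    rw [show pvPB = (fun d (x : String × String) => d.modify x.1 [] (fun v => v ++ [x.2])) from rfl]
    apply PySem.Dict.nodup_keys_foldl_modify_key L Prod.fst [] (fun _ x => (· ++ [x.2])) pvD0
    decide
  rw [PySem.Dict.items_eq_map_keys _ hnd [], hkeys]
  apply List.map_congr_left
  intro k hk
  rw [show pvPB = (fun d (p : String × String) => d.modify p.1 [] (fun v => v ++ [p.2])) from rfl]
  rw [PySem.Dict.getD_foldl_modify_append]
  have h0 : pvD0.getD k [] = [] := by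
    simp only [List.mem_cons, List.not_mem_nil, or_false] at hk
    rcases hk with rfl | rfl | rfl | rfl | rfl | rfl <;> rfl
  rw [h0, List.nil_append]

theorem pvFold3 (cfg : PySem.Dict String Int) :
    List.foldl (fun acc p => if cfg.getD p 0 ≥ 1 then acc ++ [(p, ([p] : List String))] else acc) [] ["TE", "K", "DST"]
    = (if cfg.getD "TE" 0 ≥ 1 then [("TE", ["TE"])] else [])
      ++ (if cfg.getD "K" 0 ≥ 1 then [("K", ["K"])] else [])
      ++ (if cfg.getD "DST" 0 ≥ 1 then [("DST", ["DST"])] else []) := by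
  simp only [List.foldl_cons, List.foldl_nil]
  split_ifs <;> simp

theorem pvD0_getD (p : String) : pvD0.getD p [] = [] := by
  rw [PySem.Dict.getD_eq_get?_getD]
  rcases h : pvD0.get? p with _ | v
  · rfl
  · have hm := PySem.Dict.mem_items_of_get?_eq_some _ h
    have : pvD0.items = [("QB", []), ("RB", []), ("WR", []), ("TE", []), ("K", []), ("DST", [])] := rfl
    rw [this] at hm
    simp only [List.mem_cons, List.not_mem_nil, or_false, Prod.mk.injEq] at hm
    rcases hm with ⟨_, rfl⟩ | ⟨_, rfl⟩ | ⟨_, rfl⟩ | ⟨_, rfl⟩ | ⟨_, rfl⟩ | ⟨_, rfl⟩ <;> rfl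

theorem pvIfFold (c : Prop) [Decidable c] (d : PySem.Dict String (List String)) (k v : String) :
    (if c then d.modify k [] (· ++ [v]) else d) = (if c then [(k, v)] else []).foldl pvPB d := by
  split <;> rfl

theorem pvNmFold (L : List Int) (k pre : String) (d : PySem.Dict String (List String)) :
    L.foldl (fun d i => d.modify k [] (· ++ [pre ++ PySem.Int.toStr i])) d
    = (L.map (fun i => (k, pre ++ PySem.Int.toStr i))).foldl pvPB d := by
  rw [List.foldl_map]
  rfl

theorem pvTripFold (L : List String) (d : PySem.Dict String (List String)) :
    L.foldl (fun d s => ((d.modify "RB" [] (· ++ [s])).modify "WR" [] (· ++ [s])).modify "TE" [] (· ++ [s])) d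
    = (L.flatMap (fun s => [("RB", s), ("WR", s), ("TE", s)])).foldl pvPB d := by
  rw [List.foldl_flatMap]
  rfl

theorem core_eq (cfg : PySem.Dict String Int) :
    pvSlotsA cfg = pvPositionsB.map
      (fun p => (p, ((pvDefsB cfg).filter (fun e => e.2.contains p)).map (·.1))) := by
  unfold pvSlotsA pvDefsB pvPositionsB
  dsimp only
  by_cases hu : cfg.getD "use_positions" 1 ≠ 0
  · rw [if_pos hu, if_pos hu, if_neg (not_not_intro hu)]
    rw [if_neg (show ¬ (([] : List String) ≠ []) from not_not_intro rfl)]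
    rw [pvIfFold, pvNmFold, pvNmFold, pvIfFold, pvIfFold, pvIfFold, pvTripFold]
    rw [← List.foldl_append, ← List.foldl_append, ← List.foldl_append, ← List.foldl_append,
      ← List.foldl_append, ← List.foldl_append]
    rw [pvFold3]
    -- express every name comprehension as a map over its name list, then generalize the name lists
    rw [show (fun i => ("RB", "RB" ++ PySem.Int.toStr i)) = ((fun s => ("RB", s)) ∘ (fun i => "RB" ++ PySem.Int.toStr i)) from rfl,
      show (fun i => ("WR", "WR" ++ PySem.Int.toStr i)) = ((fun s => ("WR", s)) ∘ (fun i => "WR" ++ PySem.Int.toStr i)) from rfl,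
      show (fun i => ("RB" ++ PySem.Int.toStr i, (["RB"] : List String))) = ((fun s => (s, (["RB"] : List String))) ∘ (fun i => "RB" ++ PySem.Int.toStr i)) from rfl,
      show (fun i => ("WR" ++ PySem.Int.toStr i, (["WR"] : List String))) = ((fun s => (s, (["WR"] : List String))) ∘ (fun i => "WR" ++ PySem.Int.toStr i)) from rfl,
      ← List.map_map, ← List.map_map, ← List.map_map, ← List.map_map]
    -- A's flex names (with the dead ≤ 0 guard) equal B's
    have hflex : (if cfg.getD "FLEX" 0 = 1 then ["FLEX"]
        else if cfg.getD "FLEX" 0 > 1 then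
          List.map (fun i => "FLEX" ++ PySem.Int.toStr i) (PySem.List.pyRange 1 (cfg.getD "FLEX" 0 + 1) 1)
        else [])
        = (if cfg.getD "FLEX" 0 = 1 then ["FLEX"]
        else List.map (fun i => "FLEX" ++ PySem.Int.toStr i) (PySem.List.pyRange 1 (cfg.getD "FLEX" 0 + 1) 1)) := by
      split_ifs with h1 h2
      · rfl
      · rfl
      · have hz : (cfg.getD "FLEX" 0 + 1 - 1).toNat = 0 := by omega
        rw [PySem.List.pyRange_one, hz]
        rfl
    rw [hflex]
    generalize (PySem.List.pyRange 1 (cfg.getD "RB" 0 + 1) 1).map (fun i => "RB" ++ PySem.Int.toStr i) = rbN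
    generalize (PySem.List.pyRange 1 (cfg.getD "WR" 0 + 1) 1).map (fun i => "WR" ++ PySem.Int.toStr i) = wrN
    generalize hfl : (if cfg.getD "FLEX" 0 = 1 then ["FLEX"]
        else List.map (fun i => "FLEX" ++ PySem.Int.toStr i) (PySem.List.pyRange 1 (cfg.getD "FLEX" 0 + 1) 1)) = flN
    rw [pvFoldItems _ ?hsub]
    case hsub =>
      intro x hx
      simp only [List.mem_append, List.mem_map, List.mem_flatMap, List.mem_cons, List.not_mem_nil,
        or_false, List.mem_ite_nil_right] at hx
      rcases hx with ⟨-, rfl⟩ | ⟨s, -, rfl⟩ | ⟨s, -, rfl⟩ | ⟨-, rfl⟩ | ⟨-, rfl⟩ | ⟨-, rfl⟩ | ⟨s, -, rfl | rfl | rfl⟩ <;>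
        simp
    apply List.map_congr_left
    intro p hp
    dsimp only
    congr 1
    rw [← pvFilterFlatMap _ p ?hnd]
    case hnd =>
      intro e he
      simp only [List.mem_append, List.mem_map, List.mem_cons, List.not_mem_nil,
        or_false, List.mem_ite_nil_right] at he
      rcases he with (((⟨-, rfl⟩ | ⟨s, -, rfl⟩) | ⟨s, -, rfl⟩) | (⟨-, rfl⟩ | ⟨-, rfl⟩) | ⟨-, rfl⟩) | ⟨s, -, rfl⟩ <;>
        simp [List.nodup_cons]
    congr 1
    simp only [List.flatMap_append, List.flatMap_map, List.append_assoc]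
    split_ifs <;> simp [List.map_eq_flatMap]

  · rw [if_neg hu, if_neg hu, if_pos hu]
    rw [show (fun i => ("STARTER" ++ PySem.Int.toStr i, (["QB", "RB", "WR", "TE", "K", "DST"] : List String)))
        = ((fun s => (s, (["QB", "RB", "WR", "TE", "K", "DST"] : List String))) ∘ (fun i => "STARTER" ++ PySem.Int.toStr i)) from rfl,
      ← List.map_map]
    generalize (PySem.List.pyRange 1 (cfg.getD "STARTERS" 8 + 1) 1).map (fun i => "STARTER" ++ PySem.Int.toStr i) = S
    by_cases hS : S = []
    · subst hS
      simp
      rfl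
    · rw [if_pos hS]
      have hk : ((pvD0.keys).foldl (fun d p => d.modify p [] (· ++ S)) pvD0).keys
          = (["QB", "RB", "WR", "TE", "K", "DST"] : List String) := by
        rw [PySem.Dict.keys_foldl_modify_key pvD0.keys (fun x => x) [] (fun _ _ => (· ++ S)) pvD0]
        decide
      have hnd : ((pvD0.keys).foldl (fun d p => d.modify p [] (· ++ S)) pvD0).keys.Nodup :=
        PySem.Dict.nodup_keys_foldl_modify_key _ (fun x => x) [] (fun _ _ => (· ++ S)) pvD0 (by decide)
      rw [PySem.Dict.items_eq_map_keys _ hnd [], hk]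
      apply List.map_congr_left
      intro p hp
      rw [show pvD0.keys = (["QB", "RB", "WR", "TE", "K", "DST"] : List String) from rfl]
      simp only [List.foldl_cons, List.foldl_nil]
      simp only [List.mem_cons, List.not_mem_nil, or_false] at hp
      rcases hp with rfl | rfl | rfl | rfl | rfl | rfl <;>
        (simp only [PySem.Dict.getD_modify]; simp [List.filter_map, Function.comp_def, pvD0_getD])

-- ===== VERDICT (by name: the statement is the Claim_ definition above) =====
theorem build_position_slot_map_spec : Claim_equal_build_position_slot_map := by
  intro config _
  show build_position_slot_map config = build_position_slot_map_alt config
  unfold build_position_slot_map build_position_slot_map_alt pvCfgA pvCfgB pvDefaultsA pvDefaultsB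
  exact core_eq _
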